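-- pv_equiv track=rewrite | github.com/dcrosta/shrt | shrt/db.py | shortstr
-- ===== SOURCE A (Python) =====
-- digit='abcdefghijklmnopqrstuvwxyzABCDEFGHIJKLMNOPQRSTUVWXYZ0123456789'
--
-- count=len(digit)
--
-- def shortstr(num):
--     """
--     >>> shortstr(0)
--     >>> shortstr(1)
--     'a'
--     >>> shortstr(2)
--     'b'
--     >>> shortstr(62)
--     '9'
--     >>> shortstr(63)
--     'aa'
--     >>> shortstr(64)
--     'ab'
--     >>> shortstr(1923123)
--     'hdrg'
--     """
--     if num <= 0:
--         return None
--     out = []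
--     while num:
--         num, mod = divmod(num-1, count)
--         out.append(digit[mod])
--     return ''.join(reversed(out))
-- ===== SOURCE B (Python) =====
-- digit='abcdefghijklmnopqrstuvwxyzABCDEFGHIJKLMNOPQRSTUVWXYZ0123456789'
--
-- count=len(digit)
--
-- def shortstr(num):
--     if num <= 0:
--         return None
--     # find the output length: numbers of length L occupy (S(L-1), S(L)] where S(L) = 62 + 62^2 + ... + 62^L
--     length, total = 1, count
--     while num > total:
--         length += 1
--         total += count ** length
--     # rank within the block of length-`length` strings, then an ordinary fixed-width base-62 conversion, MSB first
--     idx = num - (total - count ** length) - 1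
--     return ''.join(digit[(idx // count ** p) % count] for p in range(length - 1, -1, -1))
-- ===== Notes on version B (the rewrite author's own statement) =====
-- stated objective: alternative
-- what changed: Instead of A's divmod loop that collects digits LSB-first and reverses, B first searches for the output length L (the block of bijective base-62 numbers containing num), then emits the digits most-significant-first by an ordinary fixed-width base-62 conversion of the rank within the block using explicit powers.
import Mathlib
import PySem

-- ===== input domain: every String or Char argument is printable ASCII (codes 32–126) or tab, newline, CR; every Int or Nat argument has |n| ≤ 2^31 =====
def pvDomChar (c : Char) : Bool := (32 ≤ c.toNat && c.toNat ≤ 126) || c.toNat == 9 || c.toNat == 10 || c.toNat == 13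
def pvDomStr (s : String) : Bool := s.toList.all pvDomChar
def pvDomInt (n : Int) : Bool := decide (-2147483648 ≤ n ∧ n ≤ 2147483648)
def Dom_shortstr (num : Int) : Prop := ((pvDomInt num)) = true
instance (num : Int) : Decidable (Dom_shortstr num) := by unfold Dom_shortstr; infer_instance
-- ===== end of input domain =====

-- B replaces A's divmod while-loop + reverse with a different algorithm: it first searches for
-- the output length L (num lies in the L-th block of bijective base-62), then emits the digits
-- most-significant-first by an ordinary fixed-width base-62 conversion with explicit powers.
-- Return values proved equal; no speed claim.

-- the module constant `digit` (62 characters)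
def pvDigit : List Char := "abcdefghijklmnopqrstuvwxyzABCDEFGHIJKLMNOPQRSTUVWXYZ0123456789".toList

-- ===== PORT A =====
-- the `while num:` loop: entered only with num > 0, and num stays ≥ 0, so the
-- loop test `num` ≠ 0 is transcribed as the terminating guard ¬ num ≤ 0
def shortstrLoopA (num : Int) (out : List Char) : List Char :=
  if num ≤ 0 then out
  else
    shortstrLoopA (PySem.Int.floordiv (num - 1) 62)
      (out ++ [PySem.List.pyGetD pvDigit (PySem.Int.mod (num - 1) 62) ' '])
termination_by num.toNat
decreasing_by
  rw [PySem.Int.floordiv_eq_ediv_of_pos (by omega)]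
  omega

def shortstr (num : Int) : Option String :=
  if num ≤ 0 then none
  else some (String.ofList (shortstrLoopA num []).reverse)

-- ===== PORT B =====
-- the `while num > total:` length search; `length` is an internal counter starting at 1
def shortstrFindLenB (num : Int) (length : Nat) (total : Int) : Nat × Int :=
  if total < num then
    shortstrFindLenB num (length + 1) (total + 62 ^ (length + 1))
  else (length, total)
termination_by (num - total).toNat
decreasing_by
  have h : (0:Int) < 62 ^ (length + 1) := pow_pos (by norm_num) _
  omega

-- the generator expression: one digit per p in range(length-1, -1, -1), MSB first
def shortstr_alt (num : Int) : Option String :=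
  if num ≤ 0 then none
  else
    let lt := shortstrFindLenB num 1 62
    let idx := num - (lt.2 - 62 ^ lt.1) - 1
    some (String.ofList ((PySem.List.pyRange ((lt.1 : Int) - 1) (-1) (-1)).map
      (fun p => PySem.List.pyGetD pvDigit
        (PySem.Int.mod (PySem.Int.floordiv idx (62 ^ p.toNat)) 62) ' ')))

-- ===== PRECONDITION & SPEC =====
def Spec_shortstr (num : Int) (out : Option String) : Prop := out = shortstr_alt num
instance (num : Int) (out : Option String) : Decidable (Spec_shortstr num out) := by unfold Spec_shortstr; infer_instance

-- ===== CLAIM (what is proved, stated in full; the proofs are below) =====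
def Claim_equal_shortstr : Prop := ∀ (num : Int), Dom_shortstr num → Spec_shortstr num (shortstr num)

-- ===== LEMMAS AND PROOFS =====

-- S L = 62 + 62^2 + ... + 62^L : the largest number whose bijective representation has length ≤ L
def pvS : Nat → Int
  | 0 => 0
  | n + 1 => pvS n + 62 ^ (n + 1)

-- abbreviation for "the digit character with index i"
def pvCh (i : Int) : Char := PySem.List.pyGetD pvDigit i ' '

theorem pvS_nonneg (n : Nat) : 0 ≤ pvS n := by
  induction n with
  | zero => simp [pvS]
  | succ n ih =>
      have h : (0:Int) < 62 ^ (n + 1) := pow_pos (by norm_num) _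
      simp only [pvS]; omega

theorem pvS_strictMono : StrictMono pvS := by
  apply strictMono_nat_of_lt_succ
  intro n
  have h : (0:Int) < 62 ^ (n + 1) := pow_pos (by norm_num) _
  simp only [pvS]; omega

theorem le_pvS (n : Nat) : (n : Int) ≤ pvS n := by
  induction n with
  | zero => simp [pvS]
  | succ n ih =>
      have h : (1:Int) ≤ 62 ^ (n + 1) := one_le_pow₀ (by norm_num)
      simp only [pvS]; push_cast; omega

theorem pvS_closed (n : Nat) : 61 * pvS n + 62 = 62 ^ (n + 1) := by
  induction n with
  | zero => simp [pvS]
  | succ n ih =>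
      have h : pvS (n + 1) = pvS n + 62 ^ (n + 1) := rfl
      rw [h, pow_succ]
      omega

theorem pvS_succ_mul (n : Nat) : pvS (n + 1) = 62 * (pvS n + 1) := by
  have h : pvS (n + 1) = pvS n + 62 ^ (n + 1) := rfl
  have hc := pvS_closed n
  omega

theorem pvS_block (num : Int) (h : 0 < num) : ∃ L, pvS L < num ∧ num ≤ pvS (L + 1) := by
  have hex : ∃ n, num ≤ pvS n := ⟨num.toNat, by
    have := le_pvS num.toNat; omega⟩
  let n0 := Nat.find hex
  have hn0 : num ≤ pvS n0 := Nat.find_spec hex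
  have hne : n0 ≠ 0 := by
    intro h0
    have : num ≤ pvS 0 := by rw [← h0]; exact hn0
    simp [pvS] at this; omega
  refine ⟨n0 - 1, ?_, ?_⟩
  · have := Nat.find_min hex (m := n0 - 1) (by omega)
    omega
  · have : n0 - 1 + 1 = n0 := by omega
    rw [this]; exact hn0

-- running the loop with accumulator `out` appends to `out`
theorem shortstrLoopA_append (k : Nat) (num : Int) (hk : num.toNat ≤ k) (out : List Char) :
    shortstrLoopA num out = out ++ shortstrLoopA num [] := by
  induction k generalizing num out with
  | zero =>
      have h : num ≤ 0 := by omega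
      conv_lhs => rw [shortstrLoopA]
      conv_rhs => rw [shortstrLoopA]
      rw [if_pos h, if_pos h, List.append_nil]
  | succ k ih =>
      by_cases h : num ≤ 0
      · conv_lhs => rw [shortstrLoopA]
        conv_rhs => rw [shortstrLoopA]
        rw [if_pos h, if_pos h, List.append_nil]
      · have hq : (PySem.Int.floordiv (num - 1) 62).toNat ≤ k := by
          rw [PySem.Int.floordiv_eq_ediv_of_pos (by omega)]; omega
        conv_lhs => rw [shortstrLoopA]
        conv_rhs => rw [shortstrLoopA]
        rw [if_neg h, if_neg h, ih _ hq, ih _ hq ([] ++ _)]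
        simp

-- characterisation of A's loop: for num in the L-th block, the produced (LSB-first) digit list
-- is the ordinary base-62 digit list of the rank of num inside the block
theorem loopA_char (L : Nat) : ∀ num : Int, pvS L < num → num ≤ pvS (L + 1) →
    shortstrLoopA num [] =
      (List.range (L + 1)).map (fun p => pvCh ((num - pvS L - 1) / 62 ^ p % 62)) := by
  induction L with
  | zero =>
      intro num h1 h2
      simp only [pvS] at h1 h2
      have h62 : pvS 1 = (62 : Int) := by simp [pvS]
      have hpos : ¬ num ≤ 0 := by omega
      rw [shortstrLoopA, if_neg hpos]
      rw [PySem.Int.floordiv_eq_ediv_of_pos (by norm_num),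
          PySem.Int.mod_eq_emod_of_pos (by norm_num)]
      have hz : (num - 1) / 62 = 0 := by omega
      rw [hz, shortstrLoopA, if_pos le_rfl]
      simp [pvCh, pvS, List.range_one]
  | succ L ih =>
      intro num h1 h2
      have hSL : pvS (L + 1) = 62 * (pvS L + 1) := pvS_succ_mul L
      have hS2 : pvS (L + 1 + 1) = pvS (L + 1) + 62 ^ (L + 1 + 1) := rfl
      have hP1 : (0:Int) < 62 ^ (L + 1) := pow_pos (by norm_num) _
      have hmul : (62:Int) ^ (L + 1 + 1) = 62 ^ (L + 1) * 62 := by rw [pow_succ]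
      set idx := num - pvS (L + 1) - 1 with hidx
      have hidx0 : 0 ≤ idx := by omega
      have hidxlt : idx < 62 ^ (L + 1 + 1) := by omega
      have hSnn := pvS_nonneg L
      have hpos : ¬ num ≤ 0 := by omega
      rw [shortstrLoopA, if_neg hpos]
      rw [PySem.Int.floordiv_eq_ediv_of_pos (by norm_num),
          PySem.Int.mod_eq_emod_of_pos (by norm_num)]
      have hsplit : num - 1 = idx + (pvS L + 1) * 62 := by omega
      have hq : (num - 1) / 62 = idx / 62 + (pvS L + 1) := by omega
      have hm : (num - 1) % 62 = idx % 62 := by omega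
      set q := (num - 1) / 62 with hqdef
      have hq1 : pvS L < q := by omega
      have hq2 : q ≤ pvS (L + 1) := by
        have hSL1 : pvS (L + 1) = pvS L + 62 ^ (L + 1) := rfl
        omega
      have hq' : q - pvS L - 1 = idx / 62 := by omega
      rw [shortstrLoopA_append q.toNat q le_rfl, ih q hq1 hq2]
      rw [hq', hm]
      have hdd : ∀ p : Nat, idx / 62 ^ (p + 1) = idx / 62 / 62 ^ p := fun p => by
        rw [pow_succ']; exact (Int.ediv_ediv_of_nonneg (by norm_num)).symm
      conv_rhs => rw [List.range_succ_eq_map]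
      simp only [List.map_cons, List.map_map, List.nil_append]
      exact congrArg₂ List.cons (by simp [pvCh]) (List.map_congr_left (fun p _ => by
        simp [pvCh, Function.comp, hdd p]))

-- the length search lands exactly at the block containing num
theorem findLenB_eq (num : Int) (M : Nat) (h2 : pvS (M - 1) < num) (h3 : num ≤ pvS M) :
    ∀ k j, 0 < j → M = j + k → shortstrFindLenB num j (pvS j) = (M, pvS M) := by
  intro k
  induction k with
  | zero =>
      intro j hj hMj
      have hjM : j = M := by omega
      subst hjM
      rw [shortstrFindLenB, if_neg (by omega)]
  | succ k ih =>
      intro j hj hMj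
      have hjl : pvS j ≤ pvS (M - 1) := by
        rcases Nat.lt_or_ge j (M - 1) with h | h
        · exact le_of_lt (pvS_strictMono h)
        · have : j = M - 1 := by omega
          rw [this]
      rw [shortstrFindLenB, if_pos (by omega)]
      have hstep : pvS j + 62 ^ (j + 1) = pvS (j + 1) := rfl
      rw [hstep]
      exact ih (j + 1) (by omega) (by omega)

-- ===== VERDICT (by name: the statement is the Claim_ definition above) =====
theorem shortstr_spec : Claim_equal_shortstr := by
  intro num _
  unfold Spec_shortstr shortstr shortstr_alt
  by_cases h : num ≤ 0
  · rw [if_pos h, if_pos h]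
  · rw [if_neg h, if_neg h]
    obtain ⟨L, h1, h2⟩ := pvS_block num (by omega)
    have hS1 : pvS 1 = (62 : Int) := by simp [pvS]
    have hfind : shortstrFindLenB num 1 62 = (L + 1, pvS (L + 1)) := by
      rw [← hS1]
      exact findLenB_eq num (L + 1) (by simpa using h1) h2 L 1 (by omega) (by omega)
    simp only [hfind]
    congr 1
    apply congrArg
    have hSsub : pvS (L + 1) - 62 ^ (L + 1) = pvS L := by
      have : pvS (L + 1) = pvS L + 62 ^ (L + 1) := rfl
      omega
    set idx := num - pvS L - 1 with hidx
    rw [PySem.List.pyRange_neg_one]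
    have hlen : ((L + 1 : Nat) : Int) - 1 - (-1) = ((L + 1 : Nat) : Int) := by push_cast; ring
    rw [loopA_char L num h1 h2]
    rw [← List.map_reverse, List.range_eq_range', List.reverse_range', List.map_map, List.map_map]
    rw [hlen, Int.toNat_natCast]
    apply List.map_congr_left
    intro k hk
    have hkL : k < L + 1 := List.mem_range.mp hk
    simp only [Function.comp]
    have hcast : (((L + 1 : Nat) : Int) - 1 - (k : Int)) = ((L - k : Nat) : Int) := by
      push_cast; omega
    have hidx' : num - (pvS (L + 1) - 62 ^ (L + 1)) - 1 = idx := by omega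
    rw [hcast, Int.toNat_natCast, hidx']
    rw [PySem.Int.floordiv_eq_ediv_of_pos (pow_pos (by norm_num) _),
        PySem.Int.mod_eq_emod_of_pos (by norm_num)]
    have harg : 0 + (L + 1) - 1 - k = L - k := by omega
    rw [harg]
    rfl
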